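-- pv_equiv track=rewrite | github.com/alex-jiang-9473/dwtml | dwt_siren_split_yuv_channels.py | find_model_size_for_budget
-- ===== SOURCE A (Python) =====
-- def calculate_model_params(layers, hidden_size, dim_in=2, dim_out=1):
--     """Calculate total parameters for a SIREN model"""
--     # First layer: (dim_in * hidden_size) + hidden_size
--     first_layer = (dim_in * hidden_size) + hidden_size
--
--     # Hidden layers: (layers - 1) * [(hidden_size * hidden_size) + hidden_size]
--     hidden_layers = (layers - 1) * ((hidden_size * hidden_size) + hidden_size)
--
--     # Output layer: (hidden_size * dim_out) + dim_out
--     output_layer = (hidden_size * dim_out) + dim_out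
--
--     return first_layer + hidden_layers + output_layer
--
-- def find_model_size_for_budget(target_params, dim_in=2, dim_out=1, strict_under=True):
--     """Find (layers, hidden_size) that fits within parameter budget
--
--     Constraint: hidden_size = 3 * layers (neurons are three times of layers)
--
--     Args:
--         target_params: Target parameter count
--         dim_in: Input dimension
--         dim_out: Output dimension
--         strict_under: If True, only return configs UNDER target_params
--
--     Returns (layers, hidden_size) that gets closest to target_params without exceeding it
--     """
--     best_config = (1, 3)  # Start with minimum size (1 layer, hidden_size=3)
--     best_params = calculate_model_params(1, 3, dim_in, dim_out)
--     best_diff = abs(best_params - target_params)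
--
--     # Search with constraint: hidden_size = 3 * layers
--     for layers in range(1, 100):
--         hidden_size = 3 * layers  # Enforce constraint
--         params = calculate_model_params(layers, hidden_size, dim_in, dim_out)
--
--         # If strict, only consider configs under budget
--         if strict_under and params > target_params:
--             break
--
--         diff = abs(params - target_params)
--         if diff < best_diff:
--             best_diff = diff
--             best_config = (layers, hidden_size)
--             best_params = params
--
--         # If we're over budget and not strict, stop searching
--         if params > target_params:
--             break
--
--     return best_config
-- ===== SOURCE B (Python) =====
-- def calculate_model_params(layers, hidden_size, dim_in=2, dim_out=1):
--     """Calculate total parameters for a SIREN model"""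
--     first_layer = (dim_in * hidden_size) + hidden_size
--     hidden_layers = (layers - 1) * ((hidden_size * hidden_size) + hidden_size)
--     output_layer = (hidden_size * dim_out) + dim_out
--     return first_layer + hidden_layers + output_layer
--
-- def find_model_size_for_budget(target_params, dim_in=2, dim_out=1, strict_under=True):
--     # Phase 1: boundary scan — cut = first layers value in 1..99 whose params
--     # exceed the budget (100 if none does).
--     cut = 1
--     while cut < 100 and calculate_model_params(cut, 3 * cut, dim_in, dim_out) <= target_params:
--         cut += 1
--     # Candidates are layers 1..hi: everything before the boundary, plus the
--     # boundary itself when strict_under is off (A considers it before stopping).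
--     hi = cut - 1 if strict_under else min(cut, 99)
--     if hi < 1:
--         return (1, 3)
--     best = min(range(1, hi + 1),
--                key=lambda L: abs(calculate_model_params(L, 3 * L, dim_in, dim_out) - target_params))
--     return (best, 3 * best)
-- ===== Notes on version B (the rewrite author's own statement) =====
-- stated objective: alternative
-- what changed: Replaces A's single running-best scan (state threaded through a loop with two break points) by a two-phase decomposition: a boundary scan finding the first over-budget layer count, then an argmin (min with key, earliest tie) over the resulting candidate range.
import Mathlib
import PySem

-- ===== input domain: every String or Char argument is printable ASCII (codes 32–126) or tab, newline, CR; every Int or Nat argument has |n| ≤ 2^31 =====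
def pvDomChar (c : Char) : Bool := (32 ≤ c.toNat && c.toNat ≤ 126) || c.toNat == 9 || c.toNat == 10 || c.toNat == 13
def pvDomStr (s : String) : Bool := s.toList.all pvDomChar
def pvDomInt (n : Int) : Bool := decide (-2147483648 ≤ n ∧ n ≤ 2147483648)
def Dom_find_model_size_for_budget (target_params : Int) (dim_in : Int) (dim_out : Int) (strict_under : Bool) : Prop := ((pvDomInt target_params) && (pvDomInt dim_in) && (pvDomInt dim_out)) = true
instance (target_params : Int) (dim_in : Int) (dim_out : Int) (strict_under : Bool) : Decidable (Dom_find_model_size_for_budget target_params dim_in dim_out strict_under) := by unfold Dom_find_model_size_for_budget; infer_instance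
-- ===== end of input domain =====

-- B replaces A's single running-best scan by two phases (boundary scan for the first
-- over-budget layer count, then an argmin over the candidate range); objective: alternative.

-- ===== PORT A =====
-- calculate_model_params
def pvCalc (layers hidden_size dim_in dim_out : Int) : Int :=
  ((dim_in * hidden_size) + hidden_size)
    + (layers - 1) * ((hidden_size * hidden_size) + hidden_size)
    + ((hidden_size * dim_out) + dim_out)

-- A's for-loop over range(1,100) with its two break points; state = (best_config, best_params, best_diff)
def pvALoop (t i o : Int) (strict : Bool) : List Int → (Int × Int) × (Int × Int) → Int × Int
  | [], st => st.1
  | L :: rest, (bc, bp, bd) =>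
    let h := 3 * L
    let p := pvCalc L h i o
    if strict = true ∧ t < p then bc
    else
      let d := |p - t|
      let st' := if d < bd then ((L, h), p, d) else (bc, bp, bd)
      if t < p then st'.1 else pvALoop t i o strict rest st'

def find_model_size_for_budget (target_params : Int) (dim_in : Int) (dim_out : Int) (strict_under : Bool) : Int × Int :=
  let bp := pvCalc 1 3 dim_in dim_out
  pvALoop target_params dim_in dim_out strict_under (PySem.List.pyRange 1 100 1)
    ((1, 3), bp, |bp - target_params|)

-- ===== PORT B =====
-- Source B's while loop: first layers value in 1..99 whose params exceed the budget (100 if none)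
def pvCut (t i o : Int) : Nat → Int → Int
  | 0, c => c
  | n + 1, c =>
    if c < 100 ∧ pvCalc c (3 * c) i o ≤ t then pvCut t i o n (c + 1) else c

-- Source B's min(range(1,hi+1), key=…): fold keeping (best, best_key), earliest tie
def pvArgmin (t i o : Int) : List Int → Int × Int → Int × Int
  | [], st => st
  | L :: rest, (b, bk) =>
    let k := |pvCalc L (3 * L) i o - t|
    pvArgmin t i o rest (if k < bk then (L, k) else (b, bk))

def find_model_size_for_budget_alt (target_params : Int) (dim_in : Int) (dim_out : Int) (strict_under : Bool) : Int × Int :=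
  let cut := pvCut target_params dim_in dim_out 99 1
  let hi := if strict_under then cut - 1 else min cut 99
  if hi < 1 then (1, 3)
  else
    match PySem.List.pyRange 1 (hi + 1) 1 with
    | [] => (1, 3)
    | h :: rest =>
      let r := pvArgmin target_params dim_in dim_out rest (h, |pvCalc h (3 * h) dim_in dim_out - target_params|)
      (r.1, 3 * r.1)

-- ===== PRECONDITION & SPEC =====
def Spec_find_model_size_for_budget (target_params : Int) (dim_in : Int) (dim_out : Int) (strict_under : Bool) (out : Int × Int) : Prop := out = find_model_size_for_budget_alt target_params dim_in dim_out strict_under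
instance (target_params : Int) (dim_in : Int) (dim_out : Int) (strict_under : Bool) (out : Int × Int) : Decidable (Spec_find_model_size_for_budget target_params dim_in dim_out strict_under out) := by unfold Spec_find_model_size_for_budget; infer_instance

-- ===== CLAIM (what is proved, stated in full; the proofs are below) =====
def Claim_equal_find_model_size_for_budget : Prop := ∀ (target_params : Int) (dim_in : Int) (dim_out : Int) (strict_under : Bool), Dom_find_model_size_for_budget target_params dim_in dim_out strict_under → Spec_find_model_size_for_budget target_params dim_in dim_out strict_under (find_model_size_for_budget target_params dim_in dim_out strict_under)

-- ===== LEMMAS AND PROOFS =====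

lemma pvCut_ge (t i o : Int) : ∀ (n : Nat) (c : Int), c ≤ pvCut t i o n c := by
  intro n
  induction n with
  | zero => intro c; simp [pvCut]
  | succ m ih =>
    intro c
    simp only [pvCut]
    split
    · exact le_trans (by omega) (ih (c + 1))
    · exact le_refl c

lemma pvMain (t i o : Int) (strict : Bool) :
    ∀ (n : Nat) (st : Int), st = 100 - (n : Int) →
    ∀ (l bp bd : Int),
      pvALoop t i o strict (PySem.List.pyRange st 100 1) ((l, 3 * l), bp, bd)
        = (let cut := pvCut t i o n st
           let hi := if strict then cut - 1 else min cut 99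
           let r := pvArgmin t i o (PySem.List.pyRange st (hi + 1) 1) (l, bd)
           (r.1, 3 * r.1)) := by
  intro n
  induction n with
  | zero =>
    intro st hst l bp bd
    subst hst
    norm_num [pvCut]
    simp [pvALoop, pvArgmin]
  | succ m ih =>
    intro st hst l bp bd
    have hlt : st < 100 := by omega
    rw [PySem.List.pyRange_one_cons hlt]
    simp only [pvALoop, pvCut]
    by_cases hp : pvCalc st (3 * st) i o ≤ t
    · -- params ≤ target: keep scanning
      have hcond : ¬ (strict = true ∧ t < pvCalc st (3 * st) i o) := by
        rintro ⟨_, h⟩; omega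
      rw [if_neg hcond, if_neg (by omega : ¬ t < pvCalc st (3 * st) i o),
          if_pos (⟨hlt, hp⟩ : st < 100 ∧ pvCalc st (3 * st) i o ≤ t)]
      have hge : st + 1 ≤ pvCut t i o m (st + 1) := pvCut_ge t i o m (st + 1)
      set c := pvCut t i o m (st + 1) with hc
      have hcons : PySem.List.pyRange st ((if strict = true then c - 1 else min c 99) + 1) 1
          = st :: PySem.List.pyRange (st + 1) ((if strict = true then c - 1 else min c 99) + 1) 1 := by
        apply PySem.List.pyRange_one_cons
        split <;> omega
      rw [hcons]
      simp only [pvArgmin]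
      by_cases hd : |pvCalc st (3 * st) i o - t| < bd
      · rw [if_pos hd, if_pos hd]
        simpa using ih (st + 1) (by omega) st (pvCalc st (3 * st) i o)
          (|pvCalc st (3 * st) i o - t|)
      · rw [if_neg hd, if_neg hd]
        simpa using ih (st + 1) (by omega) l bp bd
    · -- params > target: the loop stops here
      have hguard : ¬ (st < 100 ∧ pvCalc st (3 * st) i o ≤ t) := by
        rintro ⟨_, h⟩; omega
      rw [if_neg hguard]
      cases strict with
      | true =>
        rw [if_pos (⟨rfl, by omega⟩ : (true : Bool) = true ∧ t < pvCalc st (3 * st) i o)]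
        norm_num
        simp [pvArgmin]
      | false =>
        have hcond : ¬ ((false : Bool) = true ∧ t < pvCalc st (3 * st) i o) := by
          rintro ⟨h, _⟩; exact Bool.false_ne_true h
        rw [if_neg hcond]
        simp only [Bool.false_eq_true, if_false]
        rw [show min st 99 = st by omega,
            PySem.List.pyRange_one_cons (by omega : st < st + 1),
            PySem.List.pyRange_one_eq_nil (by omega : st + 1 ≤ st + 1)]
        simp only [pvArgmin]
        by_cases hd : |pvCalc st (3 * st) i o - t| < bd
        · rw [if_pos hd, if_pos hd, if_pos (by omega : t < pvCalc st (3 * st) i o)]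
        · rw [if_neg hd, if_neg hd, if_pos (by omega : t < pvCalc st (3 * st) i o)]

-- ===== VERDICT (by name: the statement is the Claim_ definition above) =====
theorem find_model_size_for_budget_spec : Claim_equal_find_model_size_for_budget := by
  intro t i o strict _
  unfold Spec_find_model_size_for_budget find_model_size_for_budget find_model_size_for_budget_alt
  have h := pvMain t i o strict 99 1 (by norm_num) 1 (pvCalc 1 3 i o)
    (|pvCalc 1 3 i o - t|)
  norm_num at h
  rw [h]
  set c := pvCut t i o 99 1 with hc
  set hi := (if strict then c - 1 else min c 99) with hhi
  by_cases hlo : hi < 1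
  · rw [if_pos hlo, PySem.List.pyRange_one_eq_nil (by omega : hi + 1 ≤ 1)]
    simp [pvArgmin]
  · rw [if_neg hlo, PySem.List.pyRange_one_cons (by omega : (1 : Int) < hi + 1)]
    simp only [pvArgmin]
    rw [if_neg (by norm_num : ¬ |pvCalc 1 (3 * 1) i o - t| < |pvCalc 1 3 i o - t|)]
    norm_num
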